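-- pv_equiv track=rewrite | github.com/DeepthiMo/market-basket-analysis | son_apriori.py | calc_final_itemsets
-- ===== SOURCE A (Python) =====
-- from collections import defaultdict
--
-- def dictsum(*dicts):
--     """ Calculates the elementwise sum for each element in a set of dictionaries. """
--     summed_dicts = defaultdict(int)
--     for d in dicts:
--         for k, v in d.items():
--             summed_dicts[k] += v
--     return dict(summed_dicts)
--
-- def calc_final_itemsets(itemsets_list):
--     """ Loop over item sets and compute running total of frequencies,
--         filtering out item sets occurring less than four times. """
--     full_set, filtered_set = {}, {}
--
--     for chunk in itemsets_list:
--         for outer_key, outer_data in chunk.items():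
--             full_set = dictsum(full_set, outer_data)
--         filtered_set = {}
--         for key, value in full_set.items():
--             if value >= 4:
--                 filtered_set[key] = value
--     return filtered_set
-- ===== SOURCE B (Python) =====
-- def calc_final_itemsets(itemsets_list):
--     """ Transposed re-computation: flatten all inner frequency dicts to one
--         item list, then for each distinct key (first-appearance order) sum its
--         occurrences across the flat list, keeping totals >= 4. """
--     all_items = [item for chunk in itemsets_list for d in chunk.values() for item in d.items()]
--     result = {}
--     for key in dict.fromkeys(k for k, _ in all_items):
--         total = sum(v for k, v in all_items if k == key)
--         if total >= 4:
--             result[key] = total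
--     return result
-- ===== Notes on version B (the rewrite author's own statement) =====
-- stated objective: alternative
-- what changed: Replaces the running dict accumulation (rebuilding the full frequency dict via dictsum for every inner dict, re-filtering after every chunk) with a transposed scan: flatten all items once, then for each distinct key sum its value over the flat list and keep totals >= 4.
import Mathlib
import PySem

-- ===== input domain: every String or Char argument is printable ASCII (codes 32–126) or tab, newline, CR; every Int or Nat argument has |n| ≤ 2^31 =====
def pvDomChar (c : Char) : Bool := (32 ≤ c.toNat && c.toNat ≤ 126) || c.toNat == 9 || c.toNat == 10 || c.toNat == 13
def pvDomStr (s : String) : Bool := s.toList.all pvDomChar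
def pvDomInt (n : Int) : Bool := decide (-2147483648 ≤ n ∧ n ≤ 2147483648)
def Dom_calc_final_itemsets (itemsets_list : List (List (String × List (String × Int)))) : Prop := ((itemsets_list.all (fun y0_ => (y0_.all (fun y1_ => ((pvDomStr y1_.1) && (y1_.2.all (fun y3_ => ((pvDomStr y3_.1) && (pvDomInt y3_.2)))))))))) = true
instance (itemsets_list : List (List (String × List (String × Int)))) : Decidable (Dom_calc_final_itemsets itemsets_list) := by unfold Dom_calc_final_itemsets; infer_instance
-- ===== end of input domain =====

-- B replaces A's running dict accumulation with a transposed per-key scan over the flattened item list (alternative decomposition, same results).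

-- ===== PORT A =====
-- dictsum(*dicts): each dict passed as its items list (A calls it with full_set and an inner dict)
def dictsum (dicts : List (List (String × Int))) : PySem.Dict String Int :=
  dicts.foldl (fun summed d =>
    d.foldl (fun summed kv => summed.modify kv.1 0 (· + kv.2)) summed) PySem.Dict.empty

def calc_final_itemsets (itemsets_list : List (List (String × List (String × Int)))) : List (String × Int) :=
  let st := itemsets_list.foldl
    (fun (st : PySem.Dict String Int × PySem.Dict String Int) chunk =>
      let full := chunk.foldl (fun full p => dictsum [full.items, p.2]) st.1
      let filtered := full.items.foldl
        (fun (fd : PySem.Dict String Int) kv =>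
          if kv.2 ≥ 4 then fd.insert kv.1 kv.2 else fd) PySem.Dict.empty
      (full, filtered))
    (PySem.Dict.empty, PySem.Dict.empty)
  st.2.items

-- ===== PORT B =====
def calc_final_itemsets_alt (itemsets_list : List (List (String × List (String × Int)))) : List (String × Int) :=
  let allItems := itemsets_list.flatMap (fun chunk => chunk.flatMap (fun p => p.2))
  let keys := PySem.List.dedup (allItems.map Prod.fst)
  (keys.foldl (fun (res : PySem.Dict String Int) k =>
      let total := ((allItems.filter (fun q => q.1 == k)).map Prod.snd).sum
      if total ≥ 4 then res.insert k total else res) PySem.Dict.empty).items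

-- ===== PRECONDITION & SPEC =====
def Spec_calc_final_itemsets (itemsets_list : List (List (String × List (String × Int)))) (out : List (String × Int)) : Prop := out = calc_final_itemsets_alt itemsets_list
instance (itemsets_list : List (List (String × List (String × Int)))) (out : List (String × Int)) : Decidable (Spec_calc_final_itemsets itemsets_list out) := by unfold Spec_calc_final_itemsets; infer_instance

-- ===== CLAIM (what is proved, stated in full; the proofs are below) =====
def Claim_equal_calc_final_itemsets : Prop := ∀ (itemsets_list : List (List (String × List (String × Int)))), Dom_calc_final_itemsets itemsets_list → Spec_calc_final_itemsets itemsets_list (calc_final_itemsets itemsets_list)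

-- ===== LEMMAS AND PROOFS =====

-- the single accumulation step A performs per (key, value) item
def pvStep (d : PySem.Dict String Int) (p : String × Int) : PySem.Dict String Int :=
  d.modify p.1 0 (· + p.2)

def pvAccum (ps : List (String × Int)) : PySem.Dict String Int :=
  ps.foldl pvStep PySem.Dict.empty

def pvSumOf (ps : List (String × Int)) (k : String) : Int :=
  ((ps.filter (fun q => q.1 == k)).map Prod.snd).sum

lemma pvAccum_nodup (ps : List (String × Int)) : (pvAccum ps).keys.Nodup := by
  have := PySem.Dict.nodup_keys_foldl_modify_key (ν := Int) ps Prod.fst 0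
    (fun _ p => (· + p.2)) PySem.Dict.empty (by simp)
  simpa [pvAccum, pvStep] using this

lemma pvAccum_keys (ps : List (String × Int)) :
    (pvAccum ps).keys = PySem.List.dedup (ps.map Prod.fst) := by
  have := PySem.Dict.keys_foldl_modify_key (ν := Int) ps Prod.fst 0
    (fun _ p => (· + p.2)) PySem.Dict.empty
  simpa [pvAccum, pvStep, PySem.List.dedup_eq_ofList, PySem.Set.ofList,
    PySem.Set.update, PySem.Dict.keys_empty, PySem.Set.empty] using this

lemma pvFoldl_step_getD (ps : List (String × Int)) (d : PySem.Dict String Int) (k : String) :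
    (ps.foldl pvStep d).getD k 0 = d.getD k 0 + pvSumOf ps k := by
  induction ps generalizing d with
  | nil => simp [pvSumOf]
  | cons p ps ih =>
    simp only [List.foldl_cons, ih, pvStep, PySem.Dict.getD_modify, pvSumOf, List.filter_cons]
    rcases eq_or_ne k p.1 with h | h
    · simp [h]; ring
    · simp [h, Ne.symm h]

lemma pvAccum_getD (ps : List (String × Int)) (k : String) :
    (pvAccum ps).getD k 0 = pvSumOf ps k := by
  simpa using pvFoldl_step_getD ps PySem.Dict.empty k

-- rebuilding a nodup-keyed dict from its items into an empty accumulator gives it back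
lemma pvRebuild_aux (ps : List (String × Int)) (d : PySem.Dict String Int)
    (hn : (ps.map Prod.fst).Nodup) (hf : ∀ p ∈ ps, d.contains p.1 = false) :
    ps.foldl pvStep d = PySem.Dict.mk (d.items ++ ps) := by
  induction ps generalizing d with
  | nil => cases d; simp
  | cons p ps ih =>
    simp only [List.foldl_cons]
    have hc : d.contains p.1 = false := hf p (by simp)
    have hstep : pvStep d p = d.insert p.1 p.2 := by
      simp [pvStep, PySem.Dict.modify, PySem.Dict.getD_of_not_contains d 0 hc]
    rw [hstep]
    have hrec := ih (d.insert p.1 p.2)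
      (by simpa using hn.of_cons)
      (by
        intro q hq
        rw [PySem.Dict.contains_insert]
        have h1 : (q.1 == p.1) = false := by
          have : q.1 ≠ p.1 := by
            intro he
            have : p.1 ∈ ps.map Prod.fst := by
              exact List.mem_map.mpr ⟨q, hq, he⟩
            simp only [List.map_cons, List.nodup_cons] at hn
            exact hn.1 this
          simpa using this
        simp [h1, hf q (by simp [hq])])
    rw [hrec, PySem.Dict.items_insert_of_not_contains d p.2 hc]
    simp

lemma pvRebuild (d : PySem.Dict String Int) (hn : d.keys.Nodup) :
    d.items.foldl pvStep PySem.Dict.empty = d := by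
  have hf : ∀ p ∈ d.items, (PySem.Dict.empty : PySem.Dict String Int).contains p.1 = false := by
    intro p _; simp [PySem.Dict.contains_empty]
  have := pvRebuild_aux d.items PySem.Dict.empty (by simpa [PySem.Dict.keys] using hn) hf
  cases d; simpa [PySem.Dict.empty] using this

lemma pvDictsum_eq (f : PySem.Dict String Int) (d : List (String × Int)) (hn : f.keys.Nodup) :
    dictsum [f.items, d] = d.foldl pvStep f := by
  simp only [dictsum, List.foldl_cons, List.foldl_nil]
  rw [show (f.items.foldl (fun s kv => s.modify kv.1 0 (· + kv.2)) PySem.Dict.empty)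
      = f.items.foldl pvStep PySem.Dict.empty from rfl, pvRebuild f hn]
  rfl

-- the inner chunk loop of A accumulates the chunk's flattened items
lemma pvChunk_eq (chunk : List (String × List (String × Int))) (qs : List (String × Int)) :
    chunk.foldl (fun full p => dictsum [full.items, p.2]) (pvAccum qs)
      = pvAccum (qs ++ chunk.flatMap (fun p => p.2)) := by
  induction chunk generalizing qs with
  | nil => simp
  | cons p chunk ih =>
    simp only [List.foldl_cons]
    rw [pvDictsum_eq _ _ (pvAccum_nodup qs),
      show p.2.foldl pvStep (pvAccum qs) = pvAccum (qs ++ p.2) by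
        simp [pvAccum, List.foldl_append],
      ih (qs ++ p.2)]
    simp [List.flatMap_cons, List.append_assoc]

def pvFilt (d : PySem.Dict String Int) : PySem.Dict String Int :=
  d.items.foldl (fun fd kv => if kv.2 ≥ 4 then fd.insert kv.1 kv.2 else fd) PySem.Dict.empty

-- A's outer loop: state stays (accumulated dict, its filtering)
lemma pvOuter (cs : List (List (String × List (String × Int)))) (qs : List (String × Int)) :
    cs.foldl
      (fun (st : PySem.Dict String Int × PySem.Dict String Int) chunk =>
        let full := chunk.foldl (fun full p => dictsum [full.items, p.2]) st.1
        let filtered := full.items.foldl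
          (fun (fd : PySem.Dict String Int) kv =>
            if kv.2 ≥ 4 then fd.insert kv.1 kv.2 else fd) PySem.Dict.empty
        (full, filtered))
      (pvAccum qs, pvFilt (pvAccum qs))
      = (pvAccum (qs ++ cs.flatMap (fun c => c.flatMap (fun p => p.2))),
         pvFilt (pvAccum (qs ++ cs.flatMap (fun c => c.flatMap (fun p => p.2))))) := by
  induction cs generalizing qs with
  | nil => simp
  | cons c cs ih =>
    simp only [List.foldl_cons]
    rw [pvChunk_eq c qs,
      show (List.foldl (fun fd kv => if kv.2 ≥ 4 then fd.insert kv.1 kv.2 else fd)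
          PySem.Dict.empty (pvAccum (qs ++ c.flatMap (fun p => p.2))).items)
        = pvFilt (pvAccum (qs ++ c.flatMap (fun p => p.2))) from rfl,
      ih (qs ++ c.flatMap (fun p => p.2))]
    simp [List.flatMap_cons, List.append_assoc]

lemma pvFinal (ps : List (String × Int)) :
    (pvFilt (pvAccum ps)).items
      = ((PySem.List.dedup (ps.map Prod.fst)).foldl
          (fun (res : PySem.Dict String Int) k =>
            let total := pvSumOf ps k
            if total ≥ 4 then res.insert k total else res) PySem.Dict.empty).items := by
  unfold pvFilt
  rw [PySem.Dict.items_eq_map_keys _ (pvAccum_nodup ps) 0, pvAccum_keys, List.foldl_map]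
  simp only [pvAccum_getD]

-- ===== VERDICT (by name: the statement is the Claim_ definition above) =====
theorem calc_final_itemsets_spec : Claim_equal_calc_final_itemsets := by
  intro l _
  unfold Spec_calc_final_itemsets
  have hA : calc_final_itemsets l
      = (pvFilt (pvAccum (l.flatMap (fun c => c.flatMap (fun p => p.2))))).items := by
    simp only [calc_final_itemsets]
    have h := pvOuter l []
    simp only [List.nil_append] at h
    rw [show ((PySem.Dict.empty, PySem.Dict.empty) :
        PySem.Dict String Int × PySem.Dict String Int)
      = (pvAccum [], pvFilt (pvAccum [])) from rfl, h]
  have hB : calc_final_itemsets_alt l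
      = ((PySem.List.dedup ((l.flatMap (fun c => c.flatMap (fun p => p.2))).map Prod.fst)).foldl
          (fun (res : PySem.Dict String Int) k =>
            let total := pvSumOf (l.flatMap (fun c => c.flatMap (fun p => p.2))) k
            if total ≥ 4 then res.insert k total else res) PySem.Dict.empty).items := rfl
  rw [hA, hB, pvFinal]
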